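-- pv_equiv track=rewrite | github.com/pcorc/buffer_sma | utils/validators.py | validate_roll_dates
-- ===== SOURCE A (Python) =====
-- def validate_roll_dates(roll_dates_dict):
--     """
--     Validate roll dates dictionary.
--
--     Parameters:
--       roll_dates_dict: Dict with frequency keys and date list values
--
--     Returns:
--       Tuple of (is_valid, error_messages)
--     """
--     errors = []
--
--     # Check for either new format ('M', 'Q', 'S', 'A') or legacy format
--     new_format_keys = ['M', 'Q', 'S', 'A']
--     legacy_format_keys = ['monthly', 'quarterly', 'semi_annual', 'annual']
--
--     has_new_format = all(key in roll_dates_dict for key in new_format_keys)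
--     has_legacy_format = all(key in roll_dates_dict for key in legacy_format_keys)
--
--     if not (has_new_format or has_legacy_format):
--         missing_new = [key for key in new_format_keys if key not in roll_dates_dict]
--         missing_legacy = [key for key in legacy_format_keys if key not in roll_dates_dict]
--         errors.append(
--             f"Missing required frequencies. Need either {new_format_keys} or {legacy_format_keys}. "
--             f"Missing new format: {missing_new}, Missing legacy format: {missing_legacy}"
--         )
--
--     # Check that each frequency has dates
--     for freq, dates in roll_dates_dict.items():
--         if not dates or len(dates) == 0:
--             errors.append(f"No dates found for frequency: {freq}")
--         else:
--             # Check that dates are sorted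
--             sorted_dates = sorted(dates)
--             if dates != sorted_dates:
--                 errors.append(f"Dates not sorted for frequency: {freq}")
--
--     is_valid = len(errors) == 0
--
--     return is_valid, errors
-- ===== SOURCE B (Python) =====
-- def _freq_error(freq, dates):
--     """Per-frequency check: empty -> message; otherwise a single adjacency
--     scan replaces the sort-and-compare sortedness test."""
--     if not dates:
--         return "No dates found for frequency: {}".format(freq)
--     if any(a > b for a, b in zip(dates, dates[1:])):
--         return "Dates not sorted for frequency: {}".format(freq)
--     return None
--
--
-- def validate_roll_dates(roll_dates_dict):
--     new_format_keys = ['M', 'Q', 'S', 'A']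
--     legacy_format_keys = ['monthly', 'quarterly', 'semi_annual', 'annual']
--     missing_new = [k for k in new_format_keys if k not in roll_dates_dict]
--     missing_legacy = [k for k in legacy_format_keys if k not in roll_dates_dict]
--     head = []
--     if missing_new and missing_legacy:
--         head = [
--             f"Missing required frequencies. Need either {new_format_keys} or {legacy_format_keys}. "
--             f"Missing new format: {missing_new}, Missing legacy format: {missing_legacy}"
--         ]
--     errors = head + [e for freq, dates in roll_dates_dict.items()
--                      for e in [_freq_error(freq, dates)] if e is not None]
--     return not errors, errors
-- ===== Notes on version B (the rewrite author's own statement) =====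
-- stated objective: simpler
-- what changed: The missing-key lists are computed once and drive the format check (instead of separate all()-membership passes), the per-frequency loop becomes a comprehension over a helper, and the sort-and-compare sortedness test is replaced by a single early-exit adjacency scan over consecutive pairs.
import Mathlib
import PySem

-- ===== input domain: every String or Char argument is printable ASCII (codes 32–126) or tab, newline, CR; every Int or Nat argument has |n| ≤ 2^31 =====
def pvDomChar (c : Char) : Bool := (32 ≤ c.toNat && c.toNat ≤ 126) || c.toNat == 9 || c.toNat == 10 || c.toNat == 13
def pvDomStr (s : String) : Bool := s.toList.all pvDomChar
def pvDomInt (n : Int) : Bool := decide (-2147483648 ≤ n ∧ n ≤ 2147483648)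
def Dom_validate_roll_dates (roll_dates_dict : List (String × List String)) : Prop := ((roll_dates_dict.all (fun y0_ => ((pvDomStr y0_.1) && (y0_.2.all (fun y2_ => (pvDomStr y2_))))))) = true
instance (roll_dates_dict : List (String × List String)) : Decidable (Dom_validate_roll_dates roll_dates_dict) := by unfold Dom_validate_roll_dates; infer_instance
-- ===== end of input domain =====

-- B keeps the same validation semantics but computes the missing-key lists once,
-- feeds the per-frequency loop through a helper in a comprehension, and replaces
-- the sort-and-compare sortedness test by a single adjacent-pairs scan (objective: simpler).

-- ===== PORT A =====
-- Python's f"{lst}" on a list of quote-free ASCII strings; exact for the fixed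
-- frequency keys used here (no quotes or escapes inside them).
def pyReprStrList (xs : List String) : String :=
  "[" ++ String.intercalate ", " (xs.map (fun s => "'" ++ s ++ "'")) ++ "]"

def validate_roll_dates (roll_dates_dict : List (String × List String)) : Bool × List String :=
  let new_format_keys : List String := ["M", "Q", "S", "A"]
  let legacy_format_keys : List String := ["monthly", "quarterly", "semi_annual", "annual"]
  let ks := roll_dates_dict.map Prod.fst
  let has_new_format := new_format_keys.all (fun k => ks.contains k)
  let has_legacy_format := legacy_format_keys.all (fun k => ks.contains k)
  let errors : List String :=
    if !(has_new_format || has_legacy_format) then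
      let missing_new := new_format_keys.filter (fun k => !ks.contains k)
      let missing_legacy := legacy_format_keys.filter (fun k => !ks.contains k)
      ["Missing required frequencies. Need either " ++ pyReprStrList new_format_keys ++
       " or " ++ pyReprStrList legacy_format_keys ++ ". Missing new format: " ++
       pyReprStrList missing_new ++ ", Missing legacy format: " ++ pyReprStrList missing_legacy]
    else []
  let errors := roll_dates_dict.foldl (fun errs p =>
    if p.2.isEmpty then errs ++ ["No dates found for frequency: " ++ p.1]
    else
      let sorted_dates := PySem.List.sorted p.2 (fun x => x) false
      if p.2 ≠ sorted_dates then errs ++ ["Dates not sorted for frequency: " ++ p.1]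
      else errs) errors
  (decide (errors.length = 0), errors)

-- ===== PORT B =====
def freqError (freq : String) (dates : List String) : Option String :=
  if dates.isEmpty then some ("No dates found for frequency: " ++ freq)
  else if (dates.zip dates.tail).any (fun p => decide (p.2 < p.1)) then
    some ("Dates not sorted for frequency: " ++ freq)
  else none

def validate_roll_dates_alt (roll_dates_dict : List (String × List String)) : Bool × List String :=
  let new_format_keys : List String := ["M", "Q", "S", "A"]
  let legacy_format_keys : List String := ["monthly", "quarterly", "semi_annual", "annual"]
  let ks := roll_dates_dict.map Prod.fst
  let missing_new := new_format_keys.filter (fun k => !ks.contains k)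
  let missing_legacy := legacy_format_keys.filter (fun k => !ks.contains k)
  let head : List String :=
    if !missing_new.isEmpty && !missing_legacy.isEmpty then
      ["Missing required frequencies. Need either " ++ pyReprStrList new_format_keys ++
       " or " ++ pyReprStrList legacy_format_keys ++ ". Missing new format: " ++
       pyReprStrList missing_new ++ ", Missing legacy format: " ++ pyReprStrList missing_legacy]
    else []
  let errors := head ++ roll_dates_dict.filterMap (fun p => freqError p.1 p.2)
  (errors.isEmpty, errors)

-- ===== PRECONDITION & SPEC =====
def Spec_validate_roll_dates (roll_dates_dict : List (String × List String)) (out : Bool × List String) : Prop := out = validate_roll_dates_alt roll_dates_dict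
instance (roll_dates_dict : List (String × List String)) (out : Bool × List String) : Decidable (Spec_validate_roll_dates roll_dates_dict out) := by unfold Spec_validate_roll_dates; infer_instance

-- ===== CLAIM (what is proved, stated in full; the proofs are below) =====
def Claim_equal_validate_roll_dates : Prop := ∀ (roll_dates_dict : List (String × List String)), Dom_validate_roll_dates roll_dates_dict → Spec_validate_roll_dates roll_dates_dict (validate_roll_dates roll_dates_dict)

-- ===== LEMMAS AND PROOFS =====

-- all-membership test = emptiness of the filtered missing list
theorem all_eq_filter_isEmpty (keys : List String) (P : String → Bool) :
    keys.all P = (keys.filter (fun k => !P k)).isEmpty := by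
  induction keys with
  | nil => rfl
  | cons k t ih => cases h : P k <;> simp [List.all_cons, h, ih]

-- the adjacency scan reports no descent iff consecutive elements are ordered
theorem zip_any_false_iff (ds : List String) :
    (((ds.zip ds.tail).any fun p => decide (p.2 < p.1)) = false) ↔ List.IsChain (· ≤ ·) ds := by
  induction ds with
  | nil => simp
  | cons a t ih =>
    cases t with
    | nil => simp
    | cons b u =>
      simp only [List.tail_cons, List.zip_cons_cons, List.any_cons, Bool.or_eq_false_iff,
        List.isChain_cons_cons, decide_eq_false_iff_not, not_lt] at ih ⊢
      tauto

-- the sort-and-compare test agrees with the consecutive-order condition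
theorem sorted_eq_self_iff_chain (ds : List String) :
    ds = PySem.List.sorted ds (fun x => x) false ↔ List.IsChain (· ≤ ·) ds := by
  rw [List.isChain_iff_pairwise]
  constructor
  · intro h
    have := PySem.List.sorted_pairwise (xs := ds) (key := fun x => x)
    rw [← h] at this
    exact this
  · intro h
    exact (PySem.List.sorted_eq_self_of_pairwise ds (fun x => x) h).symm

-- A's per-frequency foldl is B's filterMap appended to the initial errors
theorem foldl_eq_filterMap (d : List (String × List String)) (init : List String) :
    d.foldl (fun errs p =>
      if p.2.isEmpty then errs ++ ["No dates found for frequency: " ++ p.1]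
      else
        let sorted_dates := PySem.List.sorted p.2 (fun x => x) false
        if p.2 ≠ sorted_dates then errs ++ ["Dates not sorted for frequency: " ++ p.1]
        else errs) init
    = init ++ d.filterMap (fun p => freqError p.1 p.2) := by
  induction d generalizing init with
  | nil => simp
  | cons p t ih =>
    simp only [List.foldl_cons, List.filterMap_cons]
    rw [ih]
    by_cases he : p.2.isEmpty
    · have hfe : freqError p.1 p.2 = some ("No dates found for frequency: " ++ p.1) := by
        unfold freqError; rw [if_pos he]
      rw [if_pos he, hfe]
      simp
    · rw [if_neg he]
      show ((if p.2 ≠ PySem.List.sorted p.2 (fun x => x) false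
              then init ++ ["Dates not sorted for frequency: " ++ p.1] else init) ++ _) = _
      by_cases hs : p.2 = PySem.List.sorted p.2 (fun x => x) false
      · have hz : ((p.2.zip p.2.tail).any fun q => decide (q.2 < q.1)) = false :=
          (zip_any_false_iff p.2).mpr ((sorted_eq_self_iff_chain p.2).mp hs)
        have hfe : freqError p.1 p.2 = none := by
          unfold freqError; rw [if_neg he, hz]; simp
        rw [if_neg (not_not.mpr hs), hfe]
      · have hz : ((p.2.zip p.2.tail).any fun q => decide (q.2 < q.1)) = true := by
          rcases Bool.eq_false_or_eq_true ((p.2.zip p.2.tail).any fun q => decide (q.2 < q.1))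
            with h | h
          · exact h
          · exact absurd ((sorted_eq_self_iff_chain p.2).mpr ((zip_any_false_iff p.2).mp h)) hs
        have hfe : freqError p.1 p.2 = some ("Dates not sorted for frequency: " ++ p.1) := by
          unfold freqError; rw [if_neg he, hz]; rfl
        rw [if_pos hs, hfe]
        simp

-- is_valid: len(errors) == 0 agrees with 'not errors'
theorem decide_length_eq_isEmpty (l : List String) : decide (l.length = 0) = l.isEmpty := by
  cases l <;> rfl

-- ===== VERDICT (by name: the statement is the Claim_ definition above) =====
theorem validate_roll_dates_spec : Claim_equal_validate_roll_dates := by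
  intro d _
  show validate_roll_dates d = validate_roll_dates_alt d
  unfold validate_roll_dates validate_roll_dates_alt
  simp only [foldl_eq_filterMap, all_eq_filter_isEmpty, Bool.not_or]
  refine Prod.ext ?_ rfl
  exact decide_length_eq_isEmpty _
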